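-- pv_equiv track=rewrite | github.com/Emzilla-01/hw1_git_nlb | my_code/digi_pringles.py | digi_pringles
-- ===== SOURCE A (Python) =====
-- def digi_pringles(names):
--     vowels = "aeiou"
--     result = dict()
--     for _N in names:
--         count=0
--         _n = _N.lower()
--         for _v in vowels:
--             count+=_n.count(_v)
--         result[_N]=count
--     return(result)
-- ===== SOURCE B (Python) =====
-- def digi_pringles(names):
--     vowels = set("aeiou")
--     result = dict()
--     for _N in names:
--         result[_N] = sum(1 for c in _N.lower() if c in vowels)
--     return result
-- ===== Notes on version B (the rewrite author's own statement) =====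
-- stated objective: idiomatic
-- what changed: Replaces the five repeated str.count scans per name with a single pass over the lowercased name's characters, summing membership in a vowel set.
import Mathlib
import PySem

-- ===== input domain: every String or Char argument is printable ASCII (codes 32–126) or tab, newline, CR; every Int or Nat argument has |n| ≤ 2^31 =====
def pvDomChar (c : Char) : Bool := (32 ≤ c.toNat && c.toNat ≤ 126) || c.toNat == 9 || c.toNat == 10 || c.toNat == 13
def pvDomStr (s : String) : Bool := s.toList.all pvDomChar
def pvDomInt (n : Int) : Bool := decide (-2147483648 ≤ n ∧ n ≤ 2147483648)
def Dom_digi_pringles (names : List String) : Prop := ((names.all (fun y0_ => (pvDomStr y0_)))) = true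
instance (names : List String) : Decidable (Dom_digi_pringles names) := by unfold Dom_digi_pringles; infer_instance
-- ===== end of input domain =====

-- B replaces A's five str.count scans per name with a single pass over the
-- lowercased name, counting characters that belong to a vowel set (idiomatic, same cost class).

-- ===== PORT A =====
def digi_pringles (names : List String) : List (String × Int) :=
  (names.foldl (fun result N =>
      let n := PySem.Str.lower N
      let count := "aeiou".toList.foldl
        (fun count v => count + (PySem.Str.count n (String.ofList [v]) : Int)) 0
      result.insert N count)
    PySem.Dict.empty).items

-- ===== PORT B =====
def pvVowels : PySem.Set Char := PySem.Set.ofList "aeiou".toList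

def digi_pringles_alt (names : List String) : List (String × Int) :=
  (names.foldl (fun result N =>
      result.insert N
        ((((PySem.Str.lower N).toList.filter (fun c => pvVowels.contains c)).map
            (fun _ => (1 : Int))).sum))
    PySem.Dict.empty).items

-- ===== PRECONDITION & SPEC =====
def Spec_digi_pringles (names : List String) (out : List (String × Int)) : Prop := out = digi_pringles_alt names
instance (names : List String) (out : List (String × Int)) : Decidable (Spec_digi_pringles names out) := by unfold Spec_digi_pringles; infer_instance

-- ===== CLAIM (what is proved, stated in full; the proofs are below) =====
def Claim_equal_digi_pringles : Prop := ∀ (names : List String), Dom_digi_pringles names → Spec_digi_pringles names (digi_pringles names)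

-- ===== LEMMAS AND PROOFS =====

theorem go_single (v : Char) : ∀ (fuel : Nat) (l : List Char) (acc : Nat), l.length ≤ fuel →
    PySem.Chars.count.go [v] fuel l acc = acc + l.count v := by
  intro fuel
  induction fuel with
  | zero => intro l acc h; simp at h; simp [h, PySem.Chars.count.go]
  | succ f ih =>
    intro l acc h
    cases l with
    | nil => simp [PySem.Chars.count.go]
    | cons hd t =>
      simp only [PySem.Chars.count.go]
      by_cases hv : v = hd
      · subst hv
        simp [List.isPrefixOf, ih t (acc + 1) (by simpa using h)]
        omega
      · simp [List.isPrefixOf, Ne.symm hv, hv, ih t acc (by simpa using h)]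

theorem count_single (l : List Char) (v : Char) : PySem.Chars.count l [v] = l.count v := by
  simp [PySem.Chars.count, go_single v l.length l 0 le_rfl]

theorem hv_eq : pvVowels = (['a', 'e', 'i', 'o', 'u'] : List Char) := by decide

theorem sum_ones_filter (p : Char → Bool) (L : List Char) :
    ((L.filter p).map (fun _ => (1 : Int))).sum = (L.countP p : Int) := by
  induction L with
  | nil => rfl
  | cons c t ih =>
    rw [List.countP_cons, List.filter_cons]
    by_cases h : p c
    · simp [h, List.countP_eq_length_filter]
      omega
    · simp [h, List.countP_eq_length_filter]

set_option maxHeartbeats 1000000 in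
theorem vowel_counts (L : List Char) :
    (0 : Int) + L.count 'a' + L.count 'e' + L.count 'i' + L.count 'o' + L.count 'u'
      = ((L.filter (fun c => pvVowels.contains c)).map (fun _ => (1 : Int))).sum := by
  rw [sum_ones_filter]
  induction L with
  | nil => rfl
  | cons c t ih =>
    simp only [List.count_cons, List.countP_cons, hv_eq] at *
    by_cases h : c ∈ (['a', 'e', 'i', 'o', 'u'] : List Char)
    · simp only [List.mem_cons, List.not_mem_nil, or_false] at h
      rcases h with rfl | rfl | rfl | rfl | rfl <;> simp at ih ⊢ <;> omega
    · have ha : c ≠ 'a' := fun e => h (by simp [e])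
      have he : c ≠ 'e' := fun e => h (by simp [e])
      have hi : c ≠ 'i' := fun e => h (by simp [e])
      have ho : c ≠ 'o' := fun e => h (by simp [e])
      have hu : c ≠ 'u' := fun e => h (by simp [e])
      have hc : (['a', 'e', 'i', 'o', 'u'] : List Char).contains c = false := by
        simp [ha, he, hi, ho, hu]
      simp [ha, he, hi, ho, hu] at ih ⊢
      omega

theorem count_single_str (s : String) (v : Char) :
    PySem.Str.count s (String.ofList [v]) = s.toList.count v := by
  rw [PySem.Str.count_eq]
  have h : (String.ofList [v]).toList = [v] := by simp
  rw [h, count_single]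

set_option maxHeartbeats 1000000 in
theorem per_name (N : String) :
    "aeiou".toList.foldl
        (fun count v => count + (PySem.Str.count (PySem.Str.lower N) (String.ofList [v]) : Int)) 0
      = (((PySem.Str.lower N).toList.filter (fun c => pvVowels.contains c)).map
          (fun _ => (1 : Int))).sum := by
  have hs : "aeiou".toList = ['a', 'e', 'i', 'o', 'u'] := rfl
  rw [hs]
  simp only [List.foldl_cons, List.foldl_nil, count_single_str]
  exact vowel_counts (PySem.Str.lower N).toList

theorem fold_eq (names : List String) : ∀ (d : PySem.Dict String Int),
    names.foldl (fun result N =>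
      let n := PySem.Str.lower N
      let count := "aeiou".toList.foldl
        (fun count v => count + (PySem.Str.count n (String.ofList [v]) : Int)) 0
      result.insert N count) d
    = names.foldl (fun result N =>
      result.insert N
        ((((PySem.Str.lower N).toList.filter (fun c => pvVowels.contains c)).map
            (fun _ => (1 : Int))).sum)) d := by
  induction names with
  | nil => intro d; rfl
  | cons N rest ih =>
    intro d
    simp only [List.foldl_cons]
    rw [per_name N, ih]

-- ===== VERDICT (by name: the statement is the Claim_ definition above) =====
theorem digi_pringles_spec : Claim_equal_digi_pringles := by
  intro names _
  unfold Spec_digi_pringles digi_pringles digi_pringles_alt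
  rw [fold_eq]
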